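-- pv_equiv track=rewrite | github.com/AsoFC/Disertatie | extra_diff_ev.py | get_splits
-- ===== SOURCE A (Python) =====
-- def get_splits(S, a, beta, cm, sm):
--     S_l = {}
--     S_l = {}
--     S_r = {}
--     for i in range(len(S[a[0]])):
--         for key in S:
--             if sm[i] < cm:
--                 if key not in S_l:
--                     S_l[key] = []
--                 S_l[key].append(S[key][i])
--             else:
--                 if key not in S_r:
--                     S_r[key] = []
--                 S_r[key].append(S[key][i])
--     return S_l, S_r
-- ===== SOURCE B (Python) =====
-- def get_splits(S, a, beta, cm, sm):
--     n = len(S[a[0]])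
--     left = [i for i in range(n) if sm[i] < cm]
--     right = [i for i in range(n) if not sm[i] < cm]
--     S_l = {key: [S[key][i] for i in left] for key in S} if left else {}
--     S_r = {key: [S[key][i] for i in right] for key in S} if right else {}
--     return S_l, S_r
-- ===== Notes on version B (the rewrite author's own statement) =====
-- stated objective: simpler
-- what changed: A builds both dicts row by row with a nested loop over rows and keys, appending to per-key lists; B computes the left/right row-index partition once and materializes each side with a single per-key comprehension, guarding an empty side with {}. Pre_ excludes exactly the inputs where A raises (empty a, a[0] not a key, sm or a column shorter than S[a[0]]) and association lists with duplicate keys, which do not represent a Python dict.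
import Mathlib
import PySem

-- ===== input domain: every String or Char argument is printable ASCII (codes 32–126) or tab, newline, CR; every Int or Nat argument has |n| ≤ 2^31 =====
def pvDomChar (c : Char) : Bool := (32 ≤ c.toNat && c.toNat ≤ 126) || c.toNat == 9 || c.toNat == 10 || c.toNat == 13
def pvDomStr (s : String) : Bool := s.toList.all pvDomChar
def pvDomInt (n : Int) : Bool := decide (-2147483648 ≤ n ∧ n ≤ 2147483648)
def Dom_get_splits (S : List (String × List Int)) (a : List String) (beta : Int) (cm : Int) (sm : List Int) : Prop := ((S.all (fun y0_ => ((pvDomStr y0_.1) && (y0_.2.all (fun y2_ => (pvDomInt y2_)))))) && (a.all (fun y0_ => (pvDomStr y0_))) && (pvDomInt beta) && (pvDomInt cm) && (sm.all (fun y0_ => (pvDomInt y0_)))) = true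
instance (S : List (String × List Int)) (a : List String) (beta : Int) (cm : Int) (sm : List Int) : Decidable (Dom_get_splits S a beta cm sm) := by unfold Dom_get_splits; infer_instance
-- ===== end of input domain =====

-- B replaces A's row-by-row dict-building double loop by computing the left/right row-index
-- partition once and materializing each result dict with a single comprehension per side
-- (objective: simpler; same asymptotic cost; return value only — neither version mutates S).

-- ===== PORT A =====
def get_splits (S : List (String × List Int)) (a : List String) (beta : Int) (cm : Int) (sm : List Int) : (List (String × List Int)) × (List (String × List Int)) :=
  let d := PySem.Dict.mk S
  let n := (d.getD (PySem.List.pyGetD a 0 "") []).length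
  let st := (PySem.List.pyRange 0 (n : Int) 1).foldl
    (fun (st : PySem.Dict String (List Int) × PySem.Dict String (List Int)) i =>
      d.keys.foldl (fun st k =>
        if PySem.List.pyGetD sm i 0 < cm then
          (st.1.modify k [] (· ++ [PySem.List.pyGetD (d.getD k []) i 0]), st.2)
        else
          (st.1, st.2.modify k [] (· ++ [PySem.List.pyGetD (d.getD k []) i 0]))) st)
    (PySem.Dict.empty, PySem.Dict.empty)
  (st.1.items, st.2.items)

-- ===== PORT B =====
def get_splits_alt (S : List (String × List Int)) (a : List String) (beta : Int) (cm : Int) (sm : List Int) : (List (String × List Int)) × (List (String × List Int)) :=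
  let d := PySem.Dict.mk S
  let n := (d.getD (PySem.List.pyGetD a 0 "") []).length
  let idx := PySem.List.pyRange 0 (n : Int) 1
  let left := idx.filter (fun i => decide (PySem.List.pyGetD sm i 0 < cm))
  let right := idx.filter (fun i => !decide (PySem.List.pyGetD sm i 0 < cm))
  let Sl := if left = [] then [] else d.keys.map (fun k => (k, left.map (fun i => PySem.List.pyGetD (d.getD k []) i 0)))
  let Sr := if right = [] then [] else d.keys.map (fun k => (k, right.map (fun i => PySem.List.pyGetD (d.getD k []) i 0)))
  (Sl, Sr)

-- ===== PRECONDITION & SPEC =====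
-- Pre_ excludes exactly the inputs where the Python A raises — a = [] (IndexError on a[0]),
-- a[0] not a key of S (KeyError), sm or some column shorter than the column S[a[0]] (IndexError) —
-- and association lists with duplicate keys, which do not represent a Python dict.
def Pre_get_splits (S : List (String × List Int)) (a : List String) (beta : Int) (cm : Int) (sm : List Int) : Prop :=
  (S.map Prod.fst).Nodup ∧ a ≠ [] ∧
  (PySem.Dict.mk S).contains (PySem.List.pyGetD a 0 "") = true ∧
  ((PySem.Dict.mk S).getD (PySem.List.pyGetD a 0 "") []).length ≤ sm.length ∧
  ∀ p ∈ S, ((PySem.Dict.mk S).getD (PySem.List.pyGetD a 0 "") []).length ≤ p.2.length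
instance (S : List (String × List Int)) (a : List String) (beta : Int) (cm : Int) (sm : List Int) : Decidable (Pre_get_splits S a beta cm sm) := by unfold Pre_get_splits; infer_instance

def pvWitness_get_splits : (List (String × List Int)) × List String × Int × Int × List Int :=
  ([("x", [1, 2]), ("y", [3, 4])], ["x"], 0, 1, [0, 5])

def Spec_get_splits (S : List (String × List Int)) (a : List String) (beta : Int) (cm : Int) (sm : List Int) (out : (List (String × List Int)) × (List (String × List Int))) : Prop := out = get_splits_alt S a beta cm sm
instance (S : List (String × List Int)) (a : List String) (beta : Int) (cm : Int) (sm : List Int) (out : (List (String × List Int)) × (List (String × List Int))) : Decidable (Spec_get_splits S a beta cm sm out) := by unfold Spec_get_splits; infer_instance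

-- ===== CLAIM (what is proved, stated in full; the proofs are below) =====
def Claim_equal_get_splits : Prop := ∀ (S : List (String × List Int)) (a : List String) (beta : Int) (cm : Int) (sm : List Int), Dom_get_splits S a beta cm sm → Pre_get_splits S a beta cm sm → Spec_get_splits S a beta cm sm (get_splits S a beta cm sm)

-- ===== LEMMAS AND PROOFS =====

-- A modify-append loop over fresh distinct keys appends one item per key.
theorem pv_fresh {κ ν : Type} [BEq κ] [LawfulBEq κ] (F : κ → ν → ν) (dflt : ν)
    (t : List κ) (d : PySem.Dict κ ν) (hnd : t.Nodup)
    (hdisj : ∀ k ∈ t, d.contains k = false) :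
    (t.foldl (fun d k => d.modify k dflt (F k)) d).items
      = d.items ++ t.map (fun k => (k, F k dflt)) := by
  induction t generalizing d with
  | nil => simp
  | cons k t ih =>
    simp only [List.foldl_cons, List.map_cons]
    have hc : d.contains k = false := hdisj k (by simp)
    have hg : d.getD k dflt = dflt := PySem.Dict.getD_of_not_contains d dflt hc
    rw [show d.modify k dflt (F k) = d.insert k (F k dflt) by
      simp [PySem.Dict.modify, hg]]
    rw [ih (d.insert k (F k dflt)) (by exact hnd.of_cons)
      (by
        intro k' hk'
        have hne : (k' == k) = false := by
          have : k' ≠ k := by rintro rfl; exact (List.nodup_cons.mp hnd).1 hk'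
          simp [this]
        rw [PySem.Dict.contains_insert, hne, hdisj k' (by simp [hk'])]
        rfl)]
    rw [PySem.Dict.items_insert_of_not_contains d (F k dflt) hc]
    simp

-- A modify loop over the (distinct) keys of d rewrites every value in place.
theorem pv_step {κ ν : Type} [BEq κ] [LawfulBEq κ] (F : κ → ν → ν) (dflt : ν) (g : κ → ν)
    (t : List κ) (done : List (κ × ν)) (d : PySem.Dict κ ν)
    (hd : d.items = done ++ t.map (fun k => (k, g k)))
    (hnd : (d.items.map Prod.fst).Nodup) :
    (t.foldl (fun d k => d.modify k dflt (F k)) d).items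
      = done ++ t.map (fun k => (k, F k (g k))) := by
  induction t generalizing done d with
  | nil => simpa using hd
  | cons k t ih =>
    have hid : Prod.fst ∘ (fun k : κ => (k, g k)) = id := rfl
    have hkeys : d.items.map Prod.fst = done.map Prod.fst ++ k :: t := by
      simp [hd, hid]
    have hnd2 : (done.map Prod.fst ++ k :: t).Nodup := hkeys ▸ hnd
    have hkdone : k ∉ done.map Prod.fst := by
      have h3 := (List.nodup_append.mp hnd2).2.2
      intro hmem; exact h3 k hmem k (by simp) rfl
    have hkt : k ∉ t := by
      have := (List.nodup_append.mp hnd2).2.1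
      exact (List.nodup_cons.mp this).1
    have hmem : (k, g k) ∈ d.items := by rw [hd]; simp
    have hknd : d.keys.Nodup := hnd
    have hdk : d.getD k dflt = g k := PySem.Dict.getD_of_mem_items d hmem hknd dflt
    have hcont : d.contains k = true := by
      rw [PySem.Dict.contains_iff_mem_keys]
      show k ∈ d.items.map _
      rw [hkeys]; simp
    simp only [List.foldl_cons, List.map_cons]
    rw [show d.modify k dflt (F k) = d.insert k (F k (g k)) by
      simp [PySem.Dict.modify, hdk]]
    have hd' : (d.insert k (F k (g k))).items
        = (done ++ [(k, F k (g k))]) ++ t.map (fun k => (k, g k)) := by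
      rw [PySem.Dict.items_insert_of_contains d (F k (g k)) hcont, hd]
      rw [List.map_append, List.map_cons]
      have h1 : done.map (fun p => if p.1 == k then (k, F k (g k)) else p) = done := by
        have hp : ∀ p ∈ done, (if p.1 == k then (k, F k (g k)) else p) = p := by
          intro p hp
          have hne : (p.1 == k) = false := by
            have : p.1 ≠ k := by
              intro e; exact hkdone (e ▸ List.mem_map_of_mem hp)
            simp [this]
          simp [hne]
        rw [List.map_congr_left hp]
        exact List.map_id _
      have h2 : (t.map (fun k' => (k', g k'))).map
          (fun p => if p.1 == k then (k, F k (g k)) else p) = t.map (fun k' => (k', g k')) := by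
        rw [List.map_map]
        apply List.map_congr_left
        intro k' hk'
        have hne : (k' == k) = false := by
          have : k' ≠ k := by rintro rfl; exact hkt hk'
          simp [this]
        simp [hne]
      rw [h1, List.map_cons, h2]
      simp
    have hnd' : ((d.insert k (F k (g k))).items.map Prod.fst).Nodup := by
      rw [hd']
      simpa [List.map_map, hid] using hnd2
    rw [ih (done ++ [(k, F k (g k))]) (d.insert k (F k (g k))) hd' hnd']
    simp

-- Folding the per-row modify-append loop over a list of row indices appends, per key,
-- the values of those rows.
theorem pv_rows {κ : Type} [BEq κ] [LawfulBEq κ] (keys : List κ) (val : Int → κ → Int)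
    (hnd : keys.Nodup) (is : List Int) (g : κ → List Int) (d : PySem.Dict κ (List Int))
    (hd : d.items = keys.map (fun k => (k, g k))) :
    (is.foldl (fun d i => keys.foldl (fun d k => d.modify k [] (· ++ [val i k])) d) d).items
      = keys.map (fun k => (k, g k ++ is.map (fun i => val i k))) := by
  induction is generalizing d g with
  | nil => simpa using hd
  | cons i is ih =>
    have hnd2 : (d.items.map Prod.fst).Nodup := by
      have hid : Prod.fst ∘ (fun k : κ => (k, g k)) = id := rfl
      rw [hd]; simpa [List.map_map, hid] using hnd
    have h1 := pv_step (fun k v => v ++ [val i k]) [] g keys [] d (by simpa using hd) hnd2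
    simp only [List.foldl_cons]
    rw [ih (fun k => g k ++ [val i k]) _ (by simpa using h1)]
    apply List.map_congr_left
    intro k _
    simp

-- The whole A-side accumulation from the empty dict, as an if-guarded comprehension.
theorem pv_top {κ : Type} [BEq κ] [LawfulBEq κ] (keys : List κ) (val : Int → κ → Int)
    (hnd : keys.Nodup) (is : List Int) :
    (is.foldl (fun d i => keys.foldl (fun d k => d.modify k [] (· ++ [val i k])) d)
        PySem.Dict.empty).items
      = if is = [] then [] else keys.map (fun k => (k, is.map (fun i => val i k))) := by
  cases is with
  | nil => simp [show (PySem.Dict.empty : PySem.Dict κ (List Int)).items = [] from rfl]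
  | cons i is =>
    simp only [List.foldl_cons, if_neg (List.cons_ne_nil i is)]
    have h0 := pv_fresh (fun k v => v ++ [val i k]) [] keys PySem.Dict.empty hnd
      (by intro k _; simp)
    rw [pv_rows keys val hnd is (fun k => [val i k]) _ (by simpa using h0)]
    apply List.map_congr_left
    intro k _
    simp

-- A fold touching only one component of a pair.
theorem pv_fold_fst {α κ : Type} (f : α → κ → α) (t : List κ) (st : α × α) :
    t.foldl (fun st k => (f st.1 k, st.2)) st = (t.foldl f st.1, st.2) := by
  induction t generalizing st with
  | nil => rfl
  | cons k t ih => simp [ih]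

theorem pv_fold_snd {α κ : Type} (f : α → κ → α) (t : List κ) (st : α × α) :
    t.foldl (fun st k => (st.1, f st.2 k)) st = (st.1, t.foldl f st.2) := by
  induction t generalizing st with
  | nil => rfl
  | cons k t ih => simp [ih]

-- A per-row condition not depending on the key pulls out of the inner loop.
theorem pv_inner_if {α κ : Type} (c : Prop) [Decidable c] (f g : α → κ → α) (t : List κ)
    (st : α × α) :
    t.foldl (fun st k => if c then (f st.1 k, st.2) else (st.1, g st.2 k)) st
      = if c then (t.foldl f st.1, st.2) else (st.1, t.foldl g st.2) := by
  by_cases h : c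
  · simp only [if_pos h]; exact pv_fold_fst f t st
  · simp only [if_neg h]; exact pv_fold_snd g t st

-- The outer loop splits into the two filtered index lists.
theorem pv_split {α : Type} (P : Int → Bool) (f g : α → Int → α)
    (is : List Int) (d1 d2 : α) :
    is.foldl (fun st i => if P i then (f st.1 i, st.2) else (st.1, g st.2 i)) (d1, d2)
      = ((is.filter P).foldl f d1, (is.filter (fun i => !P i)).foldl g d2) := by
  induction is generalizing d1 d2 with
  | nil => rfl
  | cons i is ih =>
    cases h : P i
    · simp [h, ih]
    · simp [h, ih]

-- The whole A-side double loop, stated on the concrete modify-append body, as B computes it.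
theorem pv_main (sm : List Int) (cm : Int) (d0 : PySem.Dict String (List Int))
    (keys : List String) (hnd : keys.Nodup) (is : List Int) :
    ((is.foldl (fun (st : PySem.Dict String (List Int) × PySem.Dict String (List Int)) i =>
        keys.foldl (fun st k =>
          if PySem.List.pyGetD sm i 0 < cm then
            (st.1.modify k [] (· ++ [PySem.List.pyGetD (d0.getD k []) i 0]), st.2)
          else
            (st.1, st.2.modify k [] (· ++ [PySem.List.pyGetD (d0.getD k []) i 0]))) st)
        (PySem.Dict.empty, PySem.Dict.empty)).1.items,
     (is.foldl (fun (st : PySem.Dict String (List Int) × PySem.Dict String (List Int)) i =>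
        keys.foldl (fun st k =>
          if PySem.List.pyGetD sm i 0 < cm then
            (st.1.modify k [] (· ++ [PySem.List.pyGetD (d0.getD k []) i 0]), st.2)
          else
            (st.1, st.2.modify k [] (· ++ [PySem.List.pyGetD (d0.getD k []) i 0]))) st)
        (PySem.Dict.empty, PySem.Dict.empty)).2.items)
    = (if is.filter (fun i => decide (PySem.List.pyGetD sm i 0 < cm)) = [] then []
       else keys.map (fun k => (k, (is.filter (fun i => decide (PySem.List.pyGetD sm i 0 < cm))).map
         (fun i => PySem.List.pyGetD (d0.getD k []) i 0))),
       if is.filter (fun i => !decide (PySem.List.pyGetD sm i 0 < cm)) = [] then []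
       else keys.map (fun k => (k, (is.filter (fun i => !decide (PySem.List.pyGetD sm i 0 < cm))).map
         (fun i => PySem.List.pyGetD (d0.getD k []) i 0)))) := by
  have hinner : (fun (st : PySem.Dict String (List Int) × PySem.Dict String (List Int)) i =>
      keys.foldl (fun st k =>
        if PySem.List.pyGetD sm i 0 < cm then
          (st.1.modify k [] (· ++ [PySem.List.pyGetD (d0.getD k []) i 0]), st.2)
        else
          (st.1, st.2.modify k [] (· ++ [PySem.List.pyGetD (d0.getD k []) i 0]))) st)
    = (fun st i =>
        if decide (PySem.List.pyGetD sm i 0 < cm) then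
          (keys.foldl (fun d k => d.modify k [] (· ++ [PySem.List.pyGetD (d0.getD k []) i 0])) st.1, st.2)
        else
          (st.1, keys.foldl (fun d k => d.modify k [] (· ++ [PySem.List.pyGetD (d0.getD k []) i 0])) st.2)) := by
    funext st i
    rw [pv_inner_if (PySem.List.pyGetD sm i 0 < cm)
      (fun d k => d.modify k [] (· ++ [PySem.List.pyGetD (d0.getD k []) i 0]))
      (fun d k => d.modify k [] (· ++ [PySem.List.pyGetD (d0.getD k []) i 0])) keys st]
    simp only [decide_eq_true_eq]
  rw [hinner]
  have hsplit : is.foldl (fun (st : PySem.Dict String (List Int) × PySem.Dict String (List Int)) i =>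
      if decide (PySem.List.pyGetD sm i 0 < cm) then
        (keys.foldl (fun d k => d.modify k [] (· ++ [PySem.List.pyGetD (d0.getD k []) i 0])) st.1, st.2)
      else
        (st.1, keys.foldl (fun d k => d.modify k [] (· ++ [PySem.List.pyGetD (d0.getD k []) i 0])) st.2))
      (PySem.Dict.empty, PySem.Dict.empty)
    = ((is.filter (fun i => decide (PySem.List.pyGetD sm i 0 < cm))).foldl
        (fun d i => keys.foldl (fun d k => d.modify k [] (· ++ [PySem.List.pyGetD (d0.getD k []) i 0])) d)
        PySem.Dict.empty,
       (is.filter (fun i => !decide (PySem.List.pyGetD sm i 0 < cm))).foldl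
        (fun d i => keys.foldl (fun d k => d.modify k [] (· ++ [PySem.List.pyGetD (d0.getD k []) i 0])) d)
        PySem.Dict.empty) :=
    pv_split (fun i => decide (PySem.List.pyGetD sm i 0 < cm))
      (fun d i => keys.foldl (fun d k => d.modify k [] (· ++ [PySem.List.pyGetD (d0.getD k []) i 0])) d)
      (fun d i => keys.foldl (fun d k => d.modify k [] (· ++ [PySem.List.pyGetD (d0.getD k []) i 0])) d)
      is PySem.Dict.empty PySem.Dict.empty
  rw [hsplit]
  have htop1 := pv_top keys (fun i k => PySem.List.pyGetD (d0.getD k []) i 0) hnd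
    (is.filter (fun i => decide (PySem.List.pyGetD sm i 0 < cm)))
  have htop2 := pv_top keys (fun i k => PySem.List.pyGetD (d0.getD k []) i 0) hnd
    (is.filter (fun i => !decide (PySem.List.pyGetD sm i 0 < cm)))
  exact Prod.ext htop1 htop2

-- ===== VERDICT (by name: the statement is the Claim_ definition above) =====
theorem get_splits_spec : Claim_equal_get_splits := by
  intro S a beta cm sm _ hpre
  obtain ⟨hnd, -, -, -, -⟩ := hpre
  have hknd : (PySem.Dict.mk S).keys.Nodup := by
    simpa [PySem.Dict.keys] using hnd
  exact pv_main sm cm (PySem.Dict.mk S) (PySem.Dict.mk S).keys hknd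
    (PySem.List.pyRange 0
      (((PySem.Dict.mk S).getD (PySem.List.pyGetD a 0 "") []).length : Int) 1)
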